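-- pv_equiv track=rewrite | github.com/adiamar25/adiamar25 | Intro2CS/ex7/ex7.py | index_compare
-- ===== SOURCE A (Python) =====
-- from typing import List, Any
--
-- def index_compare(l1: List[int], l2: List[int], last_index: int) -> bool:
--     if last_index == 0:
--         if len(l1) > 0 and len(l2) > 0:
--             if l1[0] == l2[0]:
--                 return True
--             return False
--         return False
--     if last_index == len(l1)-1:
--         if l1[last_index] != l2[last_index]:
--             return False
--         return index_compare(l1, l2, last_index-1)
--     else:
--         if last_index-1 >= 0:
--             if l1[last_index-1] != l2[last_index-1]:
--                 return False
--             return index_compare(l1, l2, last_index-1)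
--         return index_compare(l1, l2, last_index-1)
-- ===== SOURCE B (Python) =====
-- def index_compare(l1, l2, last_index):
--     n = len(l1)
--     i = last_index
--     while i > 0:
--         j = i if i == n - 1 else i - 1
--         if l1[j] != l2[j]:
--             return False
--         i -= 1
--     return n > 0 and len(l2) > 0 and l1[0] == l2[0]
-- ===== Notes on version B (the rewrite author's own statement) =====
-- stated objective: alternative
-- what changed: A's self-recursion is replaced by an explicit iterative count-down while-loop with early return; Pre_ excludes exactly the inputs where A raises (negative last_index gives RecursionError, out-of-range comparisons give IndexError).
import Mathlib
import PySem

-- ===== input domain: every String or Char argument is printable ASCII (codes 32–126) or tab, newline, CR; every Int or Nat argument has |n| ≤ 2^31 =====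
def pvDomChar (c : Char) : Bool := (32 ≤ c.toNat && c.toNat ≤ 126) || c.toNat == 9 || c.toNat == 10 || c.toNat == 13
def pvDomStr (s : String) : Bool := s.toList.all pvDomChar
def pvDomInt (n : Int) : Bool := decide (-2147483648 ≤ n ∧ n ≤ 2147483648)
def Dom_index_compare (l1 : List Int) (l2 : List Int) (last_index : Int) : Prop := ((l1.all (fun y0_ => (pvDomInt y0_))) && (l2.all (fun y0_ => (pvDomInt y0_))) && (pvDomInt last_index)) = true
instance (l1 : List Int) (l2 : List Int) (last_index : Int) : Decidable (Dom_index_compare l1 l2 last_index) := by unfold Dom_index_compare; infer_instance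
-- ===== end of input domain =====

-- B replaces A's recursion by an explicit iterative count-down loop (objective: alternative decomposition, same cost).

-- ===== PORT A =====
-- Literal port of the recursion; `l1[x] != l2[x]` is ported as inequality of the
-- pyGet? options (exact whenever the index is in range, which Pre_ guarantees);
-- where Python raises (negative last_index: RecursionError) the port returns
-- false — those inputs are excluded by Pre_.
def index_compare (l1 : List Int) (l2 : List Int) (last_index : Int) : Bool :=
  if h0 : last_index = 0 then
    if 0 < l1.length ∧ 0 < l2.length then
      PySem.List.pyGet? l1 0 == PySem.List.pyGet? l2 0
    else false
  else if hneg : last_index < 0 then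
    false
  else if last_index = (l1.length : Int) - 1 then
    if PySem.List.pyGet? l1 last_index != PySem.List.pyGet? l2 last_index then false
    else index_compare l1 l2 (last_index - 1)
  else if 0 ≤ last_index - 1 then
    if PySem.List.pyGet? l1 (last_index - 1) != PySem.List.pyGet? l2 (last_index - 1) then false
    else index_compare l1 l2 (last_index - 1)
  else index_compare l1 l2 (last_index - 1)
termination_by last_index.toNat
decreasing_by all_goals omega

-- ===== PORT B =====
-- the `while i > 0` loop of Source B, as structural recursion on i
def pvAltLoop (l1 l2 : List Int) (n i : Int) : Bool :=
  if h : 0 < i then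
    let j := if i = n - 1 then i else i - 1
    if PySem.List.pyGet? l1 j != PySem.List.pyGet? l2 j then false
    else pvAltLoop l1 l2 n (i - 1)
  else
    decide (0 < n) && (decide (0 < l2.length) &&
      (PySem.List.pyGet? l1 0 == PySem.List.pyGet? l2 0))
termination_by i.toNat
decreasing_by omega

def index_compare_alt (l1 : List Int) (l2 : List Int) (last_index : Int) : Bool :=
  pvAltLoop l1 l2 (l1.length : Int) last_index

-- ===== PRECONDITION & SPEC =====
-- Pre_ excludes exactly the inputs where A raises: negative last_index (unbounded
-- recursion → RecursionError, or IndexError at l1[-1]) and positive last_index whose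
-- comparisons reach an index out of range of l1 or l2 (IndexError). On every other
-- input A returns normally.
def Pre_index_compare (l1 : List Int) (l2 : List Int) (last_index : Int) : Prop :=
  0 ≤ last_index ∧
    (last_index = 0 ∨
      (if last_index = (l1.length : Int) - 1 then last_index < (l2.length : Int)
       else last_index ≤ (l1.length : Int) ∧ last_index ≤ (l2.length : Int)))

instance (l1 : List Int) (l2 : List Int) (last_index : Int) : Decidable (Pre_index_compare l1 l2 last_index) := by
  unfold Pre_index_compare; infer_instance

def pvWitness_index_compare : List Int × List Int × Int := ([1, 2, 3], [1, 2, 3], 2)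

def Spec_index_compare (l1 : List Int) (l2 : List Int) (last_index : Int) (out : Bool) : Prop := out = index_compare_alt l1 l2 last_index
instance (l1 : List Int) (l2 : List Int) (last_index : Int) (out : Bool) : Decidable (Spec_index_compare l1 l2 last_index out) := by unfold Spec_index_compare; infer_instance

-- ===== CLAIM (what is proved, stated in full; the proofs are below) =====
def Claim_equal_index_compare : Prop := ∀ (l1 : List Int) (l2 : List Int) (last_index : Int), Dom_index_compare l1 l2 last_index → Pre_index_compare l1 l2 last_index → Spec_index_compare l1 l2 last_index (index_compare l1 l2 last_index)

-- ===== LEMMAS AND PROOFS =====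

-- the two ports agree for every non-negative last_index (Pre_ additionally rules
-- out the inputs where the Python A raises)
theorem pvAgree (l1 l2 : List Int) (li : Int) (h : 0 ≤ li) :
    index_compare l1 l2 li = pvAltLoop l1 l2 (l1.length : Int) li := by
  induction li, h using Int.le_induction with
  | base =>
    rw [index_compare, pvAltLoop]
    rw [dif_pos rfl, dif_neg (by omega : ¬ (0:Int) < 0)]
    rcases l1 with _ | ⟨a, t1⟩ <;> rcases l2 with _ | ⟨b, t2⟩ <;> simp
  | succ m hm ih =>
    rw [index_compare, pvAltLoop]
    rw [dif_neg (by omega : ¬ m + 1 = 0), dif_neg (by omega : ¬ m + 1 < 0),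
      dif_pos (by omega : (0:Int) < m + 1)]
    have he : m + 1 - 1 = m := by omega
    by_cases htop : m + 1 = (l1.length : Int) - 1
    · rw [if_pos htop]
      simp only [if_pos htop, he, ih]
    · rw [if_neg htop, if_pos (by omega : (0:Int) ≤ m + 1 - 1)]
      simp only [if_neg htop, he, ih]

-- ===== VERDICT (by name: the statement is the Claim_ definition above) =====
theorem index_compare_spec : Claim_equal_index_compare := by
  intro l1 l2 li _ hpre
  unfold Spec_index_compare index_compare_alt
  exact pvAgree l1 l2 li hpre.1
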